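-- pv_equiv track=rewrite | github.com/divyanshhhhhh/NetSpecter | backend/analysis/detectors/port_scan.py | _count_sequential_runs
-- ===== SOURCE A (Python) =====
-- def _count_sequential_runs(ports: list[int]) -> int:
--     """Count runs of sequential port numbers."""
--     if len(ports) < 2:
--         return 0
--
--     runs = 0
--     in_run = False
--
--     for i in range(1, len(ports)):
--         if ports[i] == ports[i - 1] + 1:
--             if not in_run:
--                 runs += 1
--                 in_run = True
--         else:
--             in_run = False
--
--     return runs
-- ===== SOURCE B (Python) =====
-- def _count_sequential_runs(ports: list[int]) -> int:
--     """Count runs of sequential port numbers."""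
--     n = len(ports)
--     runs = 0
--     i = 0
--     while i < n - 1:
--         if ports[i + 1] == ports[i] + 1:
--             runs += 1
--             i += 1
--             while i < n - 1 and ports[i + 1] == ports[i] + 1:
--                 i += 1
--         else:
--             i += 1
--     return runs
-- ===== Notes on version B (the rewrite author's own statement) =====
-- stated objective: alternative
-- what changed: Replaces the edge-detecting scan that threads an in_run flag with a two-pointer loop that, on finding a run start, counts it and jumps the index over the whole run with an inner while, so no state flag is carried.
import Mathlib
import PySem

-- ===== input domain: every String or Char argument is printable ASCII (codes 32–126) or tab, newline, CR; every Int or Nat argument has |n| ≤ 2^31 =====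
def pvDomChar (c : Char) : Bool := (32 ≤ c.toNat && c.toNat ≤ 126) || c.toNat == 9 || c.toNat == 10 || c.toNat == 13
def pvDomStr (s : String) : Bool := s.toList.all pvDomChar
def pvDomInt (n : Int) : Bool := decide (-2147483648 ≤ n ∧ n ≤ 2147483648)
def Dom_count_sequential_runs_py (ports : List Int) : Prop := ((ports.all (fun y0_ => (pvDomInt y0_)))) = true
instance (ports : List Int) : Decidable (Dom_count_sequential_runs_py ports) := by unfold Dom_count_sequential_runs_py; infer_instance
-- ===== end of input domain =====

-- B replaces A's edge-detecting scan with an in_run flag by a two-pointer loop that,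
-- at each run start, counts it and jumps the index over the whole run (alternative; same cost).


-- ===== PORT A =====
-- literal transliteration of A: early return for len < 2, then a fold over range(1, len)
-- carrying (runs, in_run); ports[i] / ports[i-1] are in range, read with pyGetD.
def count_sequential_runs_py (ports : List Int) : Int :=
  if PySem.List.len ports < 2 then 0
  else
    ((PySem.List.pyRange 1 (PySem.List.len ports) 1).foldl
      (fun (st : Int × Bool) i =>
        if PySem.List.pyGetD ports i 0 = PySem.List.pyGetD ports (i - 1) 0 + 1 then
          if !st.2 then (st.1 + 1, true) else st
        else (st.1, false))
      (0, false)).1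

-- ===== PORT B =====
-- inner while loop of B: starting just past a detected run start, advance i while the
-- next element continues the run; returns the final index.
def pvSkip (ports : List Int) (i : Nat) : Nat :=
  if h : (i : Int) < PySem.List.len ports - 1 ∧
      PySem.List.pyGetD ports ((i : Int) + 1) 0 = PySem.List.pyGetD ports (i : Int) 0 + 1 then
    pvSkip ports (i + 1)
  else i
termination_by ports.length - i
decreasing_by
  simp only [PySem.List.len_eq] at h
  omega

-- the skip loop never moves the index backwards (needed for pvLoop's termination)
theorem pvSkip_ge (ports : List Int) (i : Nat) : i ≤ pvSkip ports i := by
  rw [pvSkip]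
  split
  · have := pvSkip_ge ports (i + 1)
    omega
  · exact le_refl i
termination_by ports.length - i
decreasing_by
  rename_i h
  simp only [PySem.List.len_eq] at h
  omega

-- outer while loop of B
def pvLoop (ports : List Int) (i : Nat) (runs : Int) : Int :=
  if h : (i : Int) < PySem.List.len ports - 1 then
    if PySem.List.pyGetD ports ((i : Int) + 1) 0 = PySem.List.pyGetD ports (i : Int) 0 + 1 then
      pvLoop ports (pvSkip ports (i + 1)) (runs + 1)
    else
      pvLoop ports (i + 1) runs
  else runs
termination_by ports.length - i
decreasing_by
  · have := pvSkip_ge ports (i + 1)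
    simp only [PySem.List.len_eq] at h
    omega
  · simp only [PySem.List.len_eq] at h
    omega

-- literal transliteration of B: two-pointer loop, no flag
def count_sequential_runs_py_alt (ports : List Int) : Int :=
  pvLoop ports 0 0

-- ===== PRECONDITION & SPEC =====
def Spec_count_sequential_runs_py (ports : List Int) (out : Int) : Prop := out = count_sequential_runs_py_alt ports
instance (ports : List Int) (out : Int) : Decidable (Spec_count_sequential_runs_py ports out) := by unfold Spec_count_sequential_runs_py; infer_instance

-- ===== CLAIM (what is proved, stated in full; the proofs are below) =====
def Claim_equal_count_sequential_runs_py : Prop := ∀ (ports : List Int), Dom_count_sequential_runs_py ports → Spec_count_sequential_runs_py ports (count_sequential_runs_py ports)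

-- ===== LEMMAS AND PROOFS =====

-- the list of pairwise-consecutive booleans of ports (proof-only abstraction)
def diffsOf (ports : List Int) : List Bool :=
  (ports.zip ports.tail).map (fun p => p.2 - p.1 == 1)

-- number of maximal runs of `true` in a boolean list, given the flag `p` for the
-- previous position (a run continuing from `p = true` is not counted again)
def cntRuns : Bool → List Bool → Int
  | _, [] => 0
  | p, b :: l => (if b && !p then 1 else 0) + cntRuns b l

theorem diffsOf_length (ports : List Int) : (diffsOf ports).length = ports.length - 1 := by
  simp [diffsOf, List.length_zip, List.length_tail]

theorem diffsOf_getElem (ports : List Int) (i : Nat) (h : i < (diffsOf ports).length) :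
    (diffsOf ports)[i] = true ↔
      PySem.List.pyGetD ports ((i : Int) + 1) 0 = PySem.List.pyGetD ports (i : Int) 0 + 1 := by
  have hlen : i + 1 < ports.length := by
    have := diffsOf_length ports; omega
  have e1 : PySem.List.pyGetD ports ((i : Int) + 1) 0 = ports[i + 1] := by
    rw [PySem.List.pyGetD_eq_getElem ports 0 (by omega) (by exact_mod_cast hlen)]
    simp only [show ((i : Int) + 1).toNat = i + 1 by omega]
  have e2 : PySem.List.pyGetD ports (i : Int) 0 = ports[i] := by
    rw [PySem.List.pyGetD_eq_getElem ports 0 (by omega)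
        (by exact_mod_cast (by omega : i < ports.length))]
    simp only [Int.toNat_natCast]
  rw [e1, e2]
  simp only [diffsOf, List.getElem_map, List.getElem_zip, List.getElem_tail, beq_iff_eq]
  omega

-- drop-step: splitting one boolean off the suffix
theorem diffsOf_drop (ports : List Int) (i : Nat) (h : i < (diffsOf ports).length) :
    (diffsOf ports).drop i = (diffsOf ports)[i] :: (diffsOf ports).drop (i + 1) := by
  symm; apply List.getElem_cons_drop

-- the skip loop: cntRuns with flag true from i equals cntRuns with flag false from the skip target
theorem skip_cnt (ports : List Int) (i : Nat) :
    cntRuns false ((diffsOf ports).drop (pvSkip ports i)) =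
      cntRuns true ((diffsOf ports).drop i) := by
  rw [pvSkip]
  split
  · rename_i h
    have hlt : i < (diffsOf ports).length := by
      rw [diffsOf_length]
      have h1 := h.1
      simp only [PySem.List.len_eq] at h1
      omega
    have hb : (diffsOf ports)[i] = true :=
      (diffsOf_getElem ports i hlt).mpr h.2
    rw [diffsOf_drop ports i hlt, hb]
    rw [skip_cnt ports (i + 1)]
    simp [cntRuns]
  · rename_i h
    by_cases hlt : i < (diffsOf ports).length
    · have hi : (i : Int) < PySem.List.len ports - 1 := by
        rw [diffsOf_length] at hlt
        simp only [PySem.List.len_eq]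
        omega
      have hb : (diffsOf ports)[i] = false := by
        have hiff := diffsOf_getElem ports i hlt
        by_contra hcon
        exact h ⟨hi, hiff.mp (by revert hcon; cases (diffsOf ports)[i] <;> simp)⟩
      rw [diffsOf_drop ports i hlt, hb]
      simp [cntRuns]
    · rw [List.drop_eq_nil_of_le (by omega)]
      simp [cntRuns]
termination_by ports.length - i
decreasing_by
  rename_i h
  have h1 := h.1
  simp only [PySem.List.len_eq] at h1
  omega

-- the outer loop computes runs + cntRuns of the remaining suffix
theorem loop_cnt (ports : List Int) (i : Nat) (runs : Int) :
    pvLoop ports i runs = runs + cntRuns false ((diffsOf ports).drop i) := by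
  rw [pvLoop]
  split
  · rename_i h
    have hlt : i < (diffsOf ports).length := by
      rw [diffsOf_length]
      simp only [PySem.List.len_eq] at h
      omega
    split
    · rename_i hc
      have hb : (diffsOf ports)[i] = true :=
        (diffsOf_getElem ports i hlt).mpr hc
      rw [loop_cnt ports (pvSkip ports (i + 1)) (runs + 1),
          skip_cnt ports (i + 1),
          diffsOf_drop ports i hlt, hb]
      simp [cntRuns]
      ring
    · rename_i hc
      have hb : (diffsOf ports)[i] = false := by
        have hiff := diffsOf_getElem ports i hlt
        by_contra hcon
        exact hc (hiff.mp (by revert hcon; cases (diffsOf ports)[i] <;> simp))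
      rw [loop_cnt ports (i + 1) runs, diffsOf_drop ports i hlt, hb]
      simp [cntRuns]
  · rename_i h
    have hge : (diffsOf ports).length ≤ i := by
      rw [diffsOf_length]
      simp only [PySem.List.len_eq] at h
      omega
    rw [List.drop_eq_nil_of_le hge]
    simp [cntRuns]
termination_by ports.length - i
decreasing_by
  all_goals
    have h3 := pvSkip_ge ports (i + 1)
    have h2 := diffsOf_length ports
    omega

-- the adjacent-pair reads of A's index loop are exactly ports.zip ports.tail
theorem map_range_zip (ports : List Int) :
    (PySem.List.pyRange 1 (PySem.List.len ports) 1).map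
      (fun i => (PySem.List.pyGetD ports (i - 1) 0, PySem.List.pyGetD ports i 0))
      = ports.zip ports.tail := by
  apply List.ext_getElem
  · simp [PySem.List.length_pyRange_one, List.length_zip, List.length_tail]
  · intro k h1 h2
    have hk : k < (PySem.List.pyRange 1 (PySem.List.len ports) 1).length := by
      simpa using h1
    have hkl : k + 1 < ports.length := by
      simp [PySem.List.length_pyRange_one] at hk
      omega
    simp only [List.getElem_map, PySem.List.getElem_pyRange_one, List.getElem_zip,
      List.getElem_tail]
    rw [PySem.List.pyGetD_eq_getElem ports 0 (by omega) (by omega),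
        PySem.List.pyGetD_eq_getElem ports 0 (by omega) (by omega)]
    congr 1 <;> congr 1 <;> omega

-- A's loop computes cntRuns of the difference booleans
theorem foldA (pairs : List (Int × Int)) (r : Int) (f : Bool) :
    (pairs.foldl
      (fun (st : Int × Bool) p =>
        if p.2 = p.1 + 1 then if !st.2 then (st.1 + 1, true) else st else (st.1, false))
      (r, f)).1
      = r + cntRuns f (pairs.map (fun p => p.2 - p.1 == 1)) := by
  induction pairs generalizing r f with
  | nil => simp [cntRuns]
  | cons p t ih =>
    simp only [List.foldl_cons, List.map_cons, cntRuns]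
    by_cases hp : p.2 = p.1 + 1
    · have hb : (p.2 - p.1 == 1) = true := by simp; omega
      rw [hb, if_pos hp]
      cases f
      · change (List.foldl _ ((r : Int) + 1, true) t).1 = _
        rw [ih]; simp [add_assoc]
      · change (List.foldl _ ((r : Int), true) t).1 = _
        rw [ih]; simp
    · have hb : (p.2 - p.1 == 1) = false := by simp; omega
      rw [hb, if_neg hp]
      cases f <;>
        · change (List.foldl _ ((r : Int), false) t).1 = _
          rw [ih]; simp

-- ===== VERDICT (by name: the statement is the Claim_ definition above) =====
theorem count_sequential_runs_py_spec : Claim_equal_count_sequential_runs_py := by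
  intro ports _
  unfold Spec_count_sequential_runs_py
  have hB : count_sequential_runs_py_alt ports = cntRuns false (diffsOf ports) := by
    unfold count_sequential_runs_py_alt
    rw [loop_cnt ports 0 0]
    simp
  rw [hB]
  unfold count_sequential_runs_py
  split
  · rename_i h
    simp only [PySem.List.len_eq] at h
    match ports, h with
    | [], _ => rfl
    | [x], _ => rfl
  · rw [← List.foldl_map (f := fun i => (PySem.List.pyGetD ports (i - 1) 0, PySem.List.pyGetD ports i 0))
        (g := fun (st : Int × Bool) p =>
          if p.2 = p.1 + 1 then if !st.2 then (st.1 + 1, true) else st else (st.1, false)),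
       map_range_zip, foldA]
    simp [diffsOf]
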